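-- pv_equiv track=rewrite | github.com/pankajmore/DPP | topcoder/srm/599div2/MiniatureDachshund.py | maxMikan
-- ===== SOURCE A (Python) =====
-- def maxMikan(mikan, weight):
--     if type(mikan) == int:
--         mikan = [mikan]
--     mikan = [x for x in mikan]
--     mikan.sort()
--     c = 0
--     for i in range(len(mikan)):
--         if weight + mikan[i] <= 5000:
--             weight += mikan[i]
--             c += 1
--     return c
-- ===== SOURCE B (Python) =====
-- def maxMikan(mikan, weight):
--     if type(mikan) == int:
--         mikan = [mikan]
--     items = list(mikan)
--     c = 0
--     while items:
--         m = min(items)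
--         if weight + m > 5000:
--             break  # the minimum doesn't fit, so nothing remaining does
--         items.remove(m)
--         weight += m
--         c += 1
--     return c
-- ===== Notes on version B (the rewrite author's own statement) =====
-- stated objective: alternative
-- what changed: Replaces A's sort-then-scan greedy by selection-based min-extraction: no sort at all; repeatedly take min(items), remove it and count while it fits, stopping at the first minimum that exceeds the budget.
import Mathlib
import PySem

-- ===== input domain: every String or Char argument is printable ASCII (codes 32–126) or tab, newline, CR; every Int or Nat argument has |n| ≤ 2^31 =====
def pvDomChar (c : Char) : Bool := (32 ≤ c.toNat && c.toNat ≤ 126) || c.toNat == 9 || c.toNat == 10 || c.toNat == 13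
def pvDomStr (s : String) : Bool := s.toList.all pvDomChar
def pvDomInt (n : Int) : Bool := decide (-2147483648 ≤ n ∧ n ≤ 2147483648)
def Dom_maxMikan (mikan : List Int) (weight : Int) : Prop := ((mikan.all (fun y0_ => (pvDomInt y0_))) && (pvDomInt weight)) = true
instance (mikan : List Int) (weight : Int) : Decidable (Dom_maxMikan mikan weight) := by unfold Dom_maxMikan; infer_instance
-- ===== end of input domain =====

-- B changes the algorithm: selection-based min-extraction with early break instead of A's sort-then-scan greedy; return value proved equal.

-- ===== PORT A =====
-- A: sort a copy ascending, then one fused loop mutating (weight, c): accept an item when it still fits.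
def maxMikan (mikan : List Int) (weight : Int) : Int :=
  let m := PySem.List.sorted mikan (fun x => x) false
  (m.foldl (fun (st : Int × Int) x =>
      if st.1 + x <= 5000 then (st.1 + x, st.2 + 1) else st) (weight, 0)).2

-- ===== PORT B =====
-- B's while loop: repeatedly take min(items), remove it and count while it fits; break at the first minimum over budget.
def pvLoop (items : List Int) (weight c : Int) : Int :=
  match h : PySem.List.min? items (fun y => y) with
  | none => c
  | some m =>
    if weight + m > 5000 then c
    else
      match h2 : PySem.List.remove? items m with
      | none => c
      | some rest => pvLoop rest (weight + m) (c + 1)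
termination_by items.length
decreasing_by
  have hm : m ∈ items := PySem.List.min?_mem h
  rw [PySem.List.remove?_eq_some_erase items m hm] at h2
  cases h2
  have h1 := List.length_erase_of_mem hm
  have h2 := List.length_pos_of_mem hm
  simp only [h1]
  omega

def maxMikan_alt (mikan : List Int) (weight : Int) : Int :=
  pvLoop mikan weight 0


-- ===== PRECONDITION & SPEC =====
def Spec_maxMikan (mikan : List Int) (weight : Int) (out : Int) : Prop := out = maxMikan_alt mikan weight
instance (mikan : List Int) (weight : Int) (out : Int) : Decidable (Spec_maxMikan mikan weight out) := by unfold Spec_maxMikan; infer_instance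

-- ===== CLAIM (what is proved, stated in full; the proofs are below) =====
def Claim_equal_maxMikan : Prop := ∀ (mikan : List Int) (weight : Int), Dom_maxMikan mikan weight → Spec_maxMikan mikan weight (maxMikan mikan weight)

-- ===== LEMMAS AND PROOFS =====

-- greedy count on an (ascending) list: count the leading prefix that fits, stop at the first failure
def pvGreedy : List Int → Int → Int
  | [], _ => 0
  | x :: t, w => if w + x ≤ 5000 then 1 + pvGreedy t (w + x) else 0

-- A's fold on a ≤-sorted list: once one item fails, every later (larger) item fails
theorem pvFold_all_fail (l : List Int) : ∀ (w c : Int),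
    (∀ y ∈ l, ¬ (w + y ≤ 5000)) →
    (l.foldl (fun (st : Int × Int) x =>
      if st.1 + x ≤ 5000 then (st.1 + x, st.2 + 1) else st) (w, c)).2 = c := by
  induction l with
  | nil => intro w c _; simp
  | cons x xs ih =>
    intro w c h
    simp only [List.foldl]
    rw [if_neg (h x (by simp))]
    exact ih w c (fun y hy => h y (by simp [hy]))

-- A's fused fold over a ≤-sorted list computes pvGreedy
theorem pvFold_eq_greedy (l : List Int) : ∀ (w c : Int),
    l.Pairwise (· ≤ ·) →
    (l.foldl (fun (st : Int × Int) x =>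
      if st.1 + x ≤ 5000 then (st.1 + x, st.2 + 1) else st) (w, c)).2
      = c + pvGreedy l w := by
  induction l with
  | nil => intro w c _; simp [pvGreedy]
  | cons x xs ih =>
    intro w c hp
    have hle := (List.pairwise_cons.mp hp).1
    simp only [List.foldl, pvGreedy]
    by_cases h : w + x ≤ 5000
    · rw [if_pos h, if_pos h, ih (w + x) (c + 1) (List.pairwise_cons.mp hp).2]
      ring
    · rw [if_neg h, if_neg h,
        pvFold_all_fail xs w c (fun y hy => by have := hle y hy; omega)]
      ring

-- min? of a list equals the head of its identity sort
theorem pvMin_eq_head_sorted (l : List Int) (m h : Int) (t : List Int)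
    (hmin : PySem.List.min? l (fun y => y) = some m)
    (hs : PySem.List.sorted l (fun x => x) false = h :: t) : m = h := by
  have hmem : m ∈ l := PySem.List.min?_mem hmin
  have hhead : h ∈ l := by
    have : h ∈ PySem.List.sorted l (fun x => x) false := by simp [hs]
    exact (PySem.List.mem_sorted l (fun x => x) false h).mp this
  have h1 : m ≤ h := PySem.List.min?_isMin hmin h hhead
  have h2 : h ≤ m := PySem.List.key_head_sorted_le l (fun x => x) hs m hmem
  omega

-- erasing the minimum of l yields (as a sorted list) the tail of sorted l
theorem pvSorted_erase_min (l : List Int) (m h : Int) (t : List Int)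
    (hmin : PySem.List.min? l (fun y => y) = some m)
    (hs : PySem.List.sorted l (fun x => x) false = h :: t) :
    PySem.List.sorted (l.erase m) (fun x => x) false = t := by
  have hmh : m = h := pvMin_eq_head_sorted l m h t hmin hs
  have hperm : (PySem.List.sorted l (fun x => x) false).Perm l :=
    PySem.List.sorted_perm l (fun x => x) false
  have hperm' : t.Perm (l.erase m) := by
    have := hperm.erase m
    rw [hs, hmh] at this
    simpa [hmh] using this
  have hpw : (PySem.List.sorted l (fun x => x) false).Pairwise (· ≤ ·) :=
    PySem.List.sorted_pairwise l (fun x => x)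
  have hpt : t.Pairwise (· ≤ ·) := by
    rw [hs] at hpw; exact (List.pairwise_cons.mp hpw).2
  exact PySem.List.sorted_id_eq_of_perm_of_pairwise (l.erase m) t hperm' hpt

-- B's min-extraction loop computes pvGreedy of the sorted list
theorem pvLoop_eq_greedy (n : Nat) : ∀ (l : List Int), l.length = n → ∀ (w c : Int),
    pvLoop l w c = c + pvGreedy (PySem.List.sorted l (fun x => x) false) w := by
  induction n using Nat.strong_induction_on with
  | _ n ih =>
    intro l hn w c
    rw [pvLoop.eq_def]
    split
    · next hmin =>
        have hl : l = [] := (PySem.List.min?_eq_none_iff l (fun y => y)).mp hmin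
        subst hl
        simp [pvGreedy, PySem.List.sorted]
    · next m hmin =>
        have hmem : m ∈ l := PySem.List.min?_mem hmin
        have hne : l ≠ [] := by intro hc; subst hc; simp at hmem
        obtain ⟨h, t, hs⟩ : ∃ h t, PySem.List.sorted l (fun y => y) false = h :: t := by
          cases hq : PySem.List.sorted l (fun y => y) false with
          | nil => exact absurd ((PySem.List.sorted_eq_nil_iff l (fun y => y) false).mp hq) hne
          | cons a b => exact ⟨a, b, rfl⟩
        have hmh : m = h := pvMin_eq_head_sorted l m h t hmin hs
        by_cases hb : w + m > 5000
        · rw [if_pos hb, hs]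
          simp only [pvGreedy]
          rw [if_neg (by omega : ¬ (w + h ≤ 5000))]
          ring
        · rw [if_neg hb]
          split
          · next hrem =>
              rw [PySem.List.remove?_eq_some_erase l m hmem] at hrem
              exact absurd hrem (by simp)
          · next rest hrem =>
              rw [PySem.List.remove?_eq_some_erase l m hmem] at hrem
              cases hrem
              have hlen : (l.erase m).length < n := by
                have h1 := List.length_erase_of_mem hmem
                have h2 := List.length_pos_of_mem hmem
                omega
              rw [ih _ hlen _ rfl (w + m) (c + 1),
                pvSorted_erase_min l m h t hmin hs, hs]
              simp only [pvGreedy]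
              rw [if_pos (by omega : w + h ≤ 5000), hmh]
              ring

-- ===== VERDICT (by name: the statement is the Claim_ definition above) =====
theorem maxMikan_spec : Claim_equal_maxMikan := by
  intro mikan weight _
  unfold Spec_maxMikan maxMikan maxMikan_alt
  rw [pvFold_eq_greedy _ weight 0 (PySem.List.sorted_pairwise mikan (fun x => x)),
    pvLoop_eq_greedy mikan.length mikan rfl weight 0]
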